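-- pv_equiv track=rewrite | github.com/Normalniy-nick/stepik_course_prof | classes login_pass.py | is_include_all_register
-- ===== SOURCE A (Python) =====
-- import string
--
-- def is_include_all_register(password):
--     count = ['low_in_password', 'up_in_password']
--     flag = 0
--     for i in password:
--         if len(count) == 0:
--             return True
--         elif i in string.ascii_lowercase and (flag == 1 or flag == 0):
--             count.remove('low_in_password')
--             flag = 2
--         elif i in string.ascii_uppercase and (flag == 2 or flag == 0):
--             count.remove('up_in_password')
--             flag = 1
--     return False
-- ===== SOURCE B (Python) =====
-- import string
--
-- def is_include_all_register(password):
--     has_lower = any(c in string.ascii_lowercase for c in password)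
--     has_upper = any(c in string.ascii_uppercase for c in password)
--     return has_lower and has_upper
-- ===== Notes on version B (the rewrite author's own statement) =====
-- stated objective: simpler
-- what changed: Replaces A's mutable count-list plus tri-state flag state machine with two independent any() membership scans (has a lowercase letter, has an uppercase letter).
-- intended difference: On passwords containing both cases where the first opposite-case letter after the first cased letter is the final character, A returns False (it only checks completion at the top of the next loop iteration, an off-by-one), while B returns True, the intended answer since both registers are present. — e.g. on is_include_all_register("aA"): A returns false, B returns true
import Mathlib
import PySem

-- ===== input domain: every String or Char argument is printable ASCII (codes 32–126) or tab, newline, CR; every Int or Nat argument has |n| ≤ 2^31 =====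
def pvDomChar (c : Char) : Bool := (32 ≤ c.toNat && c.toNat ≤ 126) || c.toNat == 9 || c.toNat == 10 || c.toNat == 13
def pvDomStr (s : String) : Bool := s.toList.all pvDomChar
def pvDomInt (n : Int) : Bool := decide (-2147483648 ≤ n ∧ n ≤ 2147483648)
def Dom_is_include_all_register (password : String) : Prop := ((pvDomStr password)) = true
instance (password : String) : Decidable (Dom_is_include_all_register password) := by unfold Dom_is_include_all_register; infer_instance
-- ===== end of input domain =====

-- B replaces A's count-list + tri-state-flag state machine by two plain
-- membership scans (has a lowercase letter, has an uppercase letter);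
-- objective: simpler. B differs from A on the D_ inputs stated below.

-- ===== PORT A =====
-- `i in string.ascii_lowercase` / `... ascii_uppercase`: exact for the single
-- characters produced by iterating a string.
def pvLo (c : Char) : Bool := 97 ≤ c.toNat && c.toNat ≤ 122
def pvUp (c : Char) : Bool := 65 ≤ c.toNat && c.toNat ≤ 90

-- the for-loop of A: state = (count, flag); `count.remove(x)` always succeeds in
-- A's reachable states (the flag guards), so `.getD count` only totalises it.
def pvALoop : List Char → List String → Int → Bool
  | [], _, _ => false
  | c :: rest, count, flag =>
    if count.length == 0 then true
    else if pvLo c && (flag == 1 || flag == 0) then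
      pvALoop rest ((PySem.List.remove? count "low_in_password").getD count) 2
    else if pvUp c && (flag == 2 || flag == 0) then
      pvALoop rest ((PySem.List.remove? count "up_in_password").getD count) 1
    else
      pvALoop rest count flag

def is_include_all_register (password : String) : Bool :=
  pvALoop password.toList ["low_in_password", "up_in_password"] 0

-- ===== PORT B =====
-- B: has_lower = any(c in ascii_lowercase …), has_upper = any(c in ascii_uppercase …)
def is_include_all_register_alt (password : String) : Bool :=
  password.toList.any pvLo && password.toList.any pvUp

-- ===== PRECONDITION & SPEC =====
-- index (if any) of the first opposite-case letter after the first cased letter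
def pvSecondIdx? (cs : List Char) : Option Nat :=
  (cs.findIdx? (fun c => pvLo c || pvUp c)).bind (fun first =>
    ((cs.drop (first + 1)).findIdx?
        (fun c => if pvLo (cs.getD first ' ') then pvUp c else pvLo c)).map
      (fun j => first + 1 + j))

-- On passwords containing both cases where the first opposite-case letter after the
-- first cased letter is the FINAL character, A returns False (it only checks
-- completion at the top of the next loop iteration, an off-by-one), while B returns
-- True, the intended answer since both registers are present.
def D_is_include_all_register (password : String) : Prop :=
  password.toList.length ≥ 1 ∧
  pvSecondIdx? password.toList = some (password.toList.length - 1)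
instance (password : String) : Decidable (D_is_include_all_register password) := by
  unfold D_is_include_all_register; infer_instance

def Spec_is_include_all_register (password : String) (out : Bool) : Prop :=
  ¬ D_is_include_all_register password → out = is_include_all_register_alt password
instance (password : String) (out : Bool) : Decidable (Spec_is_include_all_register password out) := by unfold Spec_is_include_all_register; infer_instance

def pvDiffWitness_is_include_all_register : String := "aA"
def pvDiffWitnessOut_is_include_all_register : Bool × Bool := (false, true)

-- ===== CLAIM (what is proved, stated in full; the proofs are below) =====
def Claim_unchanged_is_include_all_register : Prop := ∀ (password : String), Dom_is_include_all_register password → Spec_is_include_all_register password (is_include_all_register password)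
def Claim_changed_is_include_all_register : Prop := Dom_is_include_all_register (pvDiffWitness_is_include_all_register) ∧ D_is_include_all_register (pvDiffWitness_is_include_all_register) ∧ is_include_all_register (pvDiffWitness_is_include_all_register) = pvDiffWitnessOut_is_include_all_register.1 ∧ is_include_all_register_alt (pvDiffWitness_is_include_all_register) = pvDiffWitnessOut_is_include_all_register.2 ∧ pvDiffWitnessOut_is_include_all_register.1 ≠ pvDiffWitnessOut_is_include_all_register.2
def Claim_exact_is_include_all_register : Prop := ∀ (password : String), Dom_is_include_all_register password → D_is_include_all_register password → is_include_all_register password ≠ is_include_all_register_alt password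

-- ===== LEMMAS AND PROOFS =====

-- A's value, expressed through pvSecondIdx?
def pvAval (cs : List Char) : Bool :=
  match pvSecondIdx? cs with
  | none => false
  | some s => decide (s + 1 < cs.length)

theorem pvLo_up (c : Char) (h : pvLo c = true) : pvUp c = false := by
  simp [pvLo, pvUp] at *; omega

-- with the pair gone, the loop returns true iff any character remains
theorem pvALoop_nil (cs : List Char) (flag : Int) :
    pvALoop cs [] flag = !cs.isEmpty := by
  cases cs with
  | nil => rfl
  | cons c rest => simp [pvALoop]

-- phase 2, lower seen first: succeed iff an uppercase char is followed by anything
theorem pvALoop_up (cs : List Char) :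
    pvALoop cs ["up_in_password"] 2 =
      (match cs.findIdx? pvUp with
       | none => false
       | some j => decide (j + 1 < cs.length)) := by
  induction cs with
  | nil => rfl
  | cons c rest ih =>
    by_cases hu : pvUp c = true
    · have hl : pvLo c = false := by
        by_contra h
        simp only [Bool.not_eq_false] at h
        simp [pvLo_up c h] at hu
      simp [pvALoop, hl, hu, List.findIdx?_cons, pvALoop_nil]
      cases rest <;> simp
    · simp only [Bool.not_eq_true] at hu
      simp only [pvALoop, List.findIdx?_cons, hu, List.length_cons, ih]
      norm_num
      cases h : rest.findIdx? pvUp with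
      | none => simp
      | some k => simp; try omega

-- phase 2, upper seen first (symmetric)
theorem pvALoop_low (cs : List Char) :
    pvALoop cs ["low_in_password"] 1 =
      (match cs.findIdx? pvLo with
       | none => false
       | some j => decide (j + 1 < cs.length)) := by
  induction cs with
  | nil => rfl
  | cons c rest ih =>
    by_cases hl : pvLo c = true
    · simp [pvALoop, hl, PySem.List.remove?, pvALoop_nil, List.findIdx?_cons]
      cases rest <;> simp
    · simp only [Bool.not_eq_true] at hl
      simp only [pvALoop, List.findIdx?_cons, hl, List.length_cons, ih]
      norm_num
      cases h : rest.findIdx? pvLo with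
      | none => simp
      | some k => simp; try omega


-- shape of pvSecondIdx? on cons
theorem pvSecondIdx?_cons_lo (c : Char) (rest : List Char) (hl : pvLo c = true) :
    pvSecondIdx? (c :: rest) = (rest.findIdx? pvUp).map (fun j => 1 + j) := by
  simp [pvSecondIdx?, List.findIdx?_cons, hl]

theorem pvSecondIdx?_cons_up (c : Char) (rest : List Char) (hu : pvUp c = true) :
    pvSecondIdx? (c :: rest) = (rest.findIdx? pvLo).map (fun j => 1 + j) := by
  have hl : pvLo c = false := by
    by_contra h; simp only [Bool.not_eq_false] at h; simp [pvLo_up c h] at hu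
  simp [pvSecondIdx?, List.findIdx?_cons, hl, hu]

theorem pvSecondIdx?_cons_none (c : Char) (rest : List Char)
    (hl : pvLo c = false) (hu : pvUp c = false) :
    pvSecondIdx? (c :: rest) = (pvSecondIdx? rest).map (fun s => s + 1) := by
  simp [pvSecondIdx?, List.findIdx?_cons, hl, hu]
  cases h : rest.findIdx? (fun c => pvLo c || pvUp c) with
  | none => simp
  | some first =>
    simp
    congr 1
    funext j
    simp [Function.comp]
    omega

-- the main correspondence between A's state machine and pvSecondIdx?
theorem pvALoop_eq_pvAval (cs : List Char) :
    pvALoop cs ["low_in_password", "up_in_password"] 0 = pvAval cs := by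
  induction cs with
  | nil => rfl
  | cons c rest ih =>
    by_cases hl : pvLo c = true
    · have hu := pvLo_up c hl
      simp only [pvALoop, hl, hu, pvAval, pvSecondIdx?_cons_lo c rest hl]
      norm_num [pvALoop_up]
      cases h : rest.findIdx? pvUp with
      | none => simp
      | some j =>
        simp only [Option.map_some]
        simp only [decide_eq_decide]
        omega
    · simp only [Bool.not_eq_true] at hl
      by_cases hu : pvUp c = true
      · have hr : (PySem.List.remove? ["low_in_password", "up_in_password"]
            "up_in_password").getD ["low_in_password", "up_in_password"] =
            ["low_in_password"] := rfl
        simp only [pvALoop, hl, hu, pvAval, pvSecondIdx?_cons_up c rest hu]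
        norm_num [hr, pvALoop_low]
        cases h : rest.findIdx? pvLo with
        | none => simp
        | some j =>
          simp only [Option.map_some]
          simp only [decide_eq_decide]
          omega
      · simp only [Bool.not_eq_true] at hu
        simp only [pvALoop, hl, hu, Bool.false_and, pvAval,
          pvSecondIdx?_cons_none c rest hl hu]
        norm_num
        rw [ih]
        unfold pvAval
        cases h : pvSecondIdx? rest with
        | none => simp
        | some s =>
          simp only [Option.map_some]

-- B through pvSecondIdx?: some ↔ both registers present
theorem any_eq_isSome (cs : List Char) :
    (cs.any pvLo && cs.any pvUp) = (pvSecondIdx? cs).isSome := by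
  induction cs with
  | nil => rfl
  | cons c rest ih =>
    by_cases hl : pvLo c = true
    · have hu := pvLo_up c hl
      simp [List.any_cons, hl, hu, pvSecondIdx?_cons_lo c rest hl,
        List.findIdx?_isSome]
    · simp only [Bool.not_eq_true] at hl
      by_cases hu : pvUp c = true
      · simp [List.any_cons, hl, hu, pvSecondIdx?_cons_up c rest hu,
          List.findIdx?_isSome]
      · simp only [Bool.not_eq_true] at hu
        simp [List.any_cons, hl, hu, pvSecondIdx?_cons_none c rest hl hu, ih]

theorem secondIdx_lt (cs : List Char) (s : Nat) (h : pvSecondIdx? cs = some s) :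
    s + 1 <= cs.length := by
  induction cs generalizing s with
  | nil => simp [pvSecondIdx?] at h
  | cons c rest ih =>
    by_cases hl : pvLo c = true
    · rw [pvSecondIdx?_cons_lo c rest hl] at h
      obtain ⟨j, hj, rfl⟩ := Option.map_eq_some_iff.mp h
      have := (List.findIdx?_eq_some_iff_getElem.mp hj).1
      simp only [List.length_cons]
      omega
    · simp only [Bool.not_eq_true] at hl
      by_cases hu : pvUp c = true
      · rw [pvSecondIdx?_cons_up c rest hu] at h
        obtain ⟨j, hj, rfl⟩ := Option.map_eq_some_iff.mp h
        have := (List.findIdx?_eq_some_iff_getElem.mp hj).1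
        simp only [List.length_cons]
        omega
      · simp only [Bool.not_eq_true] at hu
        rw [pvSecondIdx?_cons_none c rest hl hu] at h
        obtain ⟨t, ht, rfl⟩ := Option.map_eq_some_iff.mp h
        have := ih t ht
        simp only [List.length_cons]
        omega

-- ===== VERDICT (by name: the statement is the Claim_ definition above) =====
theorem is_include_all_register_spec : Claim_unchanged_is_include_all_register := by
  intro password _ hnD
  unfold is_include_all_register is_include_all_register_alt
  rw [pvALoop_eq_pvAval]
  unfold pvAval
  cases h : pvSecondIdx? password.toList with
  | none =>
    rw [any_eq_isSome, h]
    rfl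
  | some s =>
    have hle := secondIdx_lt password.toList s h
    have hne : s ≠ password.toList.length - 1 := by
      intro hs
      exact hnD ⟨by omega, by rw [h, hs]⟩
    rw [any_eq_isSome, h]
    simp only [Option.isSome_some]
    simp only [decide_eq_true_eq]
    omega

theorem is_include_all_register_changed : Claim_changed_is_include_all_register := by
  unfold Claim_changed_is_include_all_register; decide

theorem is_include_all_register_tight : Claim_exact_is_include_all_register := by
  intro password _ hD
  obtain ⟨hlen, hsome⟩ := hD
  unfold is_include_all_register is_include_all_register_alt
  rw [pvALoop_eq_pvAval]
  unfold pvAval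
  rw [hsome, any_eq_isSome, hsome]
  simp only [Option.isSome_some]
  intro hcontra
  simp only [decide_eq_true_eq] at hcontra
  omega
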